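-- pv_equiv track=rewrite | github.com/STRIKE1111/Watermarkhub | data_processing.py | dp_grouping
-- ===== SOURCE A (Python) =====
-- def dp_grouping(partition):
--     """
--     对一个分区使用动态规划分组，最小化组内差异总和。
--     """
--     n = len(partition)
--     if n < 2:
--         return [partition]
--
--
--     dp = [float('inf')] * n
--     split_point = [-1] * n
--     dp[0] = float('inf')
--     dp[1] = partition[1] - partition[0]
--
--
--     for i in range(2, n):
--         for j in range(i - 1):
--             cost = dp[j] + (partition[i] - partition[j + 1])
--             if cost < dp[i]:
--                 dp[i] = cost
--                 split_point[i] = j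
--
--
--     groups = []
--     i = n - 1
--     while i > 0:
--         start = split_point[i] + 1
--         groups.append(partition[start:i + 1])
--         i = split_point[i]
--     return groups[::-1]
-- ===== SOURCE B (Python) =====
-- def dp_grouping(partition):
--     """
--     Same grouping as A, computed in one pass: dp[i] = partition[i] + min_j (dp[j] - partition[j+1])
--     with the running minimum (value, first j) maintained incrementally instead of an inner scan.
--     Groups are rebuilt front-to-back by recursion instead of append-and-reverse.
--     """
--     n = len(partition)
--     if n < 2:
--         return [partition]
--
--     INF = float('inf')
--     dp = [INF] * n
--     split_point = [-1] * n
--     dp[1] = partition[1] - partition[0]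
--
--     best = None  # (dp[j] - partition[j+1], j) minimal over finite dp[j], first j on ties
--     for i in range(2, n):
--         j = i - 2
--         if dp[j] != INF:
--             v = dp[j] - partition[j + 1]
--             if best is None or v < best[0]:
--                 best = (v, j)
--         if best is not None:
--             dp[i] = best[0] + partition[i]
--             split_point[i] = best[1]
--
--     def rebuild(i):
--         if i <= 0:
--             return []
--         j = split_point[i]
--         return rebuild(j) + [partition[j + 1:i + 1]]
--
--     return rebuild(n - 1)
-- ===== Notes on version B (the rewrite author's own statement) =====
-- stated objective: faster
-- what changed: B replaces A's O(n^2) inner scan over all earlier split points by an incrementally maintained running minimum of dp[j]-partition[j+1] (one pass), and rebuilds the groups front-to-back by recursion instead of append-then-reverse.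
import Mathlib
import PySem

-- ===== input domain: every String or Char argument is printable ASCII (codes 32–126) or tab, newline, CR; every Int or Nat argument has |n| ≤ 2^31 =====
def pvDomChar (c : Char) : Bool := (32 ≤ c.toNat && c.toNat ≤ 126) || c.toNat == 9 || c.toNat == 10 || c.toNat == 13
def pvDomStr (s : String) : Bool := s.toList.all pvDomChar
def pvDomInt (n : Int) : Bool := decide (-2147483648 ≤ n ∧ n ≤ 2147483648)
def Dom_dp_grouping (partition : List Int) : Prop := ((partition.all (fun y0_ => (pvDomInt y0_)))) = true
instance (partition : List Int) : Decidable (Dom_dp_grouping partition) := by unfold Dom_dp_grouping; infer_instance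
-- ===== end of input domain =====

-- B replaces A's O(n^2) inner scan over earlier split points by an incrementally maintained
-- running minimum of dp[j] - partition[j+1] (one pass), and rebuilds the groups front-to-back
-- by recursion instead of append-then-reverse; a timing run measured B faster (asymptotic).

-- ===== PORT A =====
-- float('inf') is modelled as `none : Option Int`: pvOptAdd is inf-absorbing addition,
-- pvOptLT is Python's `<` on {ints, inf} (inf < inf is False) — exact, since A only ever
-- adds ints to inf and compares such values.
def pvOptAdd (a : Option Int) (x : Int) : Option Int := a.map (fun v => v + x)

def pvOptLT : Option Int → Option Int → Bool
  | some a, some b => decide (a < b)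
  | some _, none => true
  | none, _ => false

-- one step of A's inner loop body (`cost = dp[j] + ...; if cost < dp[i]: ...`), in place.
-- All list indices A uses are nonnegative and in range, so `getD`/`set` are exact.
def pvInnerStep (p : List Int) (i : Nat) (st : List (Option Int) × List Int) (j : Nat) :
    List (Option Int) × List Int :=
  let cost := pvOptAdd (st.1.getD j none) (p.getD i 0 - p.getD (j+1) 0)
  if pvOptLT cost (st.1.getD i none) then (st.1.set i cost, st.2.set i (j : Int)) else st

-- A's `for j in range(i - 1): ...`
def pvOuterA (p : List Int) (st : List (Option Int) × List Int) (i : Nat) :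
    List (Option Int) × List Int :=
  (List.range (i-1)).foldl (pvInnerStep p i) st

-- A's reconstruction `while i > 0: ... groups.append(partition[start:i+1]); i = split_point[i]`
-- followed by `groups[::-1]`; fuel = n bounds the loop (i strictly decreases each turn).
def pvBuildA (p sp : List Int) : Nat → Int → List (List Int) → List (List Int)
  | 0, _, acc => acc.reverse
  | f+1, i, acc =>
    if 0 < i then
      let j := sp.getD i.toNat (-1)
      pvBuildA p sp f j (acc ++ [PySem.List.slice p (some (j+1)) (some (i+1))])
    else acc.reverse

def dp_grouping (partition : List Int) : List (List Int) :=
  let n := partition.length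
  if n < 2 then [partition] else
    -- dp = [inf]*n; dp[0] = inf; dp[1] = partition[1] - partition[0]
    let dp : List (Option Int) := ((List.replicate n (none : Option Int)).set 0 none).set 1
        (some (partition.getD 1 0 - partition.getD 0 0))
    let sp : List Int := List.replicate n (-1)
    let st := (List.range' 2 (n-2)).foldl (pvOuterA partition) (dp, sp)   -- for i in range(2, n)
    pvBuildA partition st.2 n ((n : Int) - 1) []

-- ===== PORT B =====
-- B's running-minimum update: fold in j = i-2 (skipping infinite dp[j]),
-- keeping the first j on ties (strict `<`).
def pvBestStep (p : List Int) (dp : List (Option Int)) (b : Option (Int × Int)) (j : Nat) :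
    Option (Int × Int) :=
  match dp.getD j none with
  | none => b
  | some d =>
    let v := d - p.getD (j+1) 0
    match b with
    | none => some (v, (j : Int))
    | some bb => if v < bb.1 then some (v, (j : Int)) else some bb

-- one iteration of B's single pass: update the running minimum, then fill dp[i]/split_point[i]
def pvOuterB (p : List Int) (st : List (Option Int) × List Int × Option (Int × Int)) (i : Nat) :
    List (Option Int) × List Int × Option (Int × Int) :=
  let best := pvBestStep p st.1 st.2.2 (i-2)
  match best with
  | none => (st.1, st.2.1, none)
  | some bb => (st.1.set i (some (bb.1 + p.getD i 0)), st.2.1.set i bb.2, some bb)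

-- B's recursive front-to-back rebuild; fuel = n bounds the recursion depth.
def pvRebuild (p sp : List Int) : Nat → Int → List (List Int)
  | 0, _ => []
  | f+1, i =>
    if 0 < i then
      let j := sp.getD i.toNat (-1)
      pvRebuild p sp f j ++ [PySem.List.slice p (some (j+1)) (some (i+1))]
    else []

def dp_grouping_alt (partition : List Int) : List (List Int) :=
  let n := partition.length
  if n < 2 then [partition] else
    let dp : List (Option Int) := (List.replicate n (none : Option Int)).set 1
        (some (partition.getD 1 0 - partition.getD 0 0))
    let sp : List Int := List.replicate n (-1)
    let st := (List.range' 2 (n-2)).foldl (pvOuterB partition) (dp, sp, none)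
    pvRebuild partition st.2.1 n ((n : Int) - 1)

-- ===== PRECONDITION & SPEC =====
def Spec_dp_grouping (partition : List Int) (out : List (List Int)) : Prop := out = dp_grouping_alt partition
instance (partition : List Int) (out : List (List Int)) : Decidable (Spec_dp_grouping partition out) := by unfold Spec_dp_grouping; infer_instance

-- ===== CLAIM (what is proved, stated in full; the proofs are below) =====
def Claim_equal_dp_grouping : Prop := ∀ (partition : List Int), Dom_dp_grouping partition → Spec_dp_grouping partition (dp_grouping partition)

-- ===== LEMMAS AND PROOFS =====

-- generic getD/set facts
lemma pv_getD_set_ne {α : Type} (l : List α) (i j : Nat) (v d : α) (h : j ≠ i) :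
    (l.set i v).getD j d = l.getD j d := by
  simp [List.getD_eq_getElem?_getD, List.getElem?_set_ne (Ne.symm h)]

lemma pv_getD_set_self {α : Type} (l : List α) (i : Nat) (v d : α) (h : i < l.length) :
    (l.set i v).getD i d = v := by
  simp [List.getD_eq_getElem?_getD, h]

lemma pv_set_getD_self {α : Type} (l : List α) (i : Nat) (d : α) (h : i < l.length) :
    l.set i (l.getD i d) = l := by
  rw [List.getD_eq_getElem l d h]; exact List.set_getElem_self h

-- proof-only reformulation of A's inner loop: the single cell (dp[i], split_point[i]) threaded
def pvThreadStep (p : List Int) (dp : List (Option Int)) (i : Nat) (cs : Option Int × Int) (j : Nat) :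
    Option Int × Int :=
  let cost := pvOptAdd (dp.getD j none) (p.getD i 0 - p.getD (j+1) 0)
  if pvOptLT cost cs.1 then (cost, (j : Int)) else cs

-- the running minimum after scanning j ∈ range m
def pvBest (p : List Int) (dp : List (Option Int)) (m : Nat) : Option (Int × Int) :=
  (List.range m).foldl (pvBestStep p dp) none

lemma pvBest_succ (p : List Int) (dp : List (Option Int)) (m : Nat) :
    pvBest p dp (m+1) = pvBestStep p dp (pvBest p dp m) m := by
  unfold pvBest; rw [List.range_succ, List.foldl_append]; rfl

lemma pvBestStep_congr (p : List Int) (dp₁ dp₂ : List (Option Int)) (b : Option (Int × Int))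
    (j : Nat) (h : dp₁.getD j none = dp₂.getD j none) :
    pvBestStep p dp₁ b j = pvBestStep p dp₂ b j := by
  unfold pvBestStep; rw [h]

lemma pvBest_set_high (p : List Int) (dp : List (Option Int)) (i : Nat) (v : Option Int)
    (m : Nat) (h : m ≤ i) : pvBest p (dp.set i v) m = pvBest p dp m := by
  induction m with
  | zero => rfl
  | succ m ih =>
    rw [pvBest_succ, pvBest_succ, ih (by omega)]
    exact pvBestStep_congr _ _ _ _ _ (pv_getD_set_ne _ _ _ _ _ (by omega))

lemma pvThread_congr (p : List Int) (dp₁ dp₂ : List (Option Int)) (i : Nat) :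
    ∀ (js : List Nat) (cs : Option Int × Int),
    (∀ j ∈ js, dp₁.getD j none = dp₂.getD j none) →
    js.foldl (pvThreadStep p dp₁ i) cs = js.foldl (pvThreadStep p dp₂ i) cs := by
  intro js
  induction js with
  | nil => intro cs _; rfl
  | cons j js ih =>
    intro cs h
    simp only [List.foldl_cons]
    rw [show pvThreadStep p dp₁ i cs j = pvThreadStep p dp₂ i cs j by
      unfold pvThreadStep; rw [h j (by simp)]]
    exact ih _ (fun j' hj' => h j' (by simp [hj']))

-- A's in-place inner loop = the threaded loop, written back once
lemma pvInner_eq_thread (p : List Int) (i : Nat) :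
    ∀ (js : List Nat) (dp : List (Option Int)) (sp : List Int),
    (∀ j ∈ js, j < i) → i < dp.length → i < sp.length →
    js.foldl (pvInnerStep p i) (dp, sp) =
      (dp.set i (js.foldl (pvThreadStep p dp i) (dp.getD i none, sp.getD i (-1))).1,
       sp.set i (js.foldl (pvThreadStep p dp i) (dp.getD i none, sp.getD i (-1))).2) := by
  intro js
  induction js with
  | nil =>
    intro dp sp _ hdp hsp
    simp only [List.foldl_nil]
    rw [pv_set_getD_self _ _ _ hdp, pv_set_getD_self _ _ _ hsp]
  | cons j js ih =>
    intro dp sp hj hdp hsp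
    have hji : j < i := hj j (by simp)
    simp only [List.foldl_cons]
    by_cases hc : pvOptLT (pvOptAdd (dp.getD j none) (p.getD i 0 - p.getD (j+1) 0)) (dp.getD i none) = true
    · have hstep : pvInnerStep p i (dp, sp) j =
          (dp.set i (pvOptAdd (dp.getD j none) (p.getD i 0 - p.getD (j+1) 0)), sp.set i (j : Int)) := by
        unfold pvInnerStep; simp only [hc]; simp
      have hstepT : pvThreadStep p dp i (dp.getD i none, sp.getD i (-1)) j =
          (pvOptAdd (dp.getD j none) (p.getD i 0 - p.getD (j+1) 0), (j : Int)) := by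
        unfold pvThreadStep; simp only [hc]; simp
      rw [hstep, hstepT]
      rw [ih _ _ (fun j' hj' => hj j' (by simp [hj'])) (by simpa using hdp) (by simpa using hsp)]
      rw [pv_getD_set_self _ _ _ _ hdp, pv_getD_set_self _ _ _ _ hsp]
      rw [pvThread_congr p (dp.set i (pvOptAdd (dp.getD j none) (p.getD i 0 - p.getD (j+1) 0))) dp i js _
        (fun j' hj' => pv_getD_set_ne _ _ _ _ _ (by have := hj j' (by simp [hj']); omega))]
      simp [List.set_set]
    · have hstep : pvInnerStep p i (dp, sp) j = (dp, sp) := by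
        unfold pvInnerStep; simp only [hc]; simp
      have hstepT : pvThreadStep p dp i (dp.getD i none, sp.getD i (-1)) j =
          (dp.getD i none, sp.getD i (-1)) := by
        unfold pvThreadStep; simp only [hc]; simp
      rw [hstep, hstepT, ih _ _ (fun j' hj' => hj j' (by simp [hj'])) hdp hsp]

-- the threaded inner loop computes exactly the running minimum shifted by partition[i]
lemma pvThread_eq_best (p : List Int) (dp : List (Option Int)) (i : Nat) (s0 : Int) :
    ∀ m, (List.range m).foldl (pvThreadStep p dp i) (none, s0) =
      ((pvBest p dp m).map (fun b => b.1 + p.getD i 0),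
       (pvBest p dp m).elim s0 (fun b => b.2)) := by
  intro m
  induction m with
  | zero => rfl
  | succ m ih =>
    rw [List.range_succ, List.foldl_append, ih, pvBest_succ]
    simp only [List.foldl_cons, List.foldl_nil]
    unfold pvThreadStep pvBestStep
    cases hdm : dp.getD m none with
    | none => simp [pvOptAdd, pvOptLT]
    | some d =>
      cases hb : pvBest p dp m with
      | none =>
        simp only [pvOptAdd, Option.map_none, Option.map_some, Option.elim_none, pvOptLT,
          Option.elim_some, if_true, Prod.mk.injEq, Option.some.injEq]
        exact ⟨by ring, by trivial⟩
      | some bb =>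
        simp only [pvOptAdd, Option.map_some, Option.elim_some, pvOptLT, decide_eq_true_eq]
        by_cases hlt : d - p.getD (m+1) 0 < bb.1
        · rw [if_pos (by omega), if_pos hlt]
          simp only [Option.map_some, Option.elim_some, Prod.mk.injEq, Option.some.injEq]
          exact ⟨by ring, by trivial⟩
        · rw [if_neg (by omega), if_neg hlt]
          simp

-- A's append-then-reverse reconstruction = B's recursive front-to-back reconstruction
lemma pvBuildA_eq_rebuild (p sp : List Int) :
    ∀ (f : Nat) (i : Int) (acc : List (List Int)),
    pvBuildA p sp f i acc = pvRebuild p sp f i ++ acc.reverse := by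
  intro f
  induction f with
  | zero => intro i acc; simp [pvBuildA, pvRebuild]
  | succ f ih =>
    intro i acc
    by_cases hi : 0 < i
    · simp only [pvBuildA, pvRebuild, if_pos hi]
      rw [ih]
      simp
    · simp [pvBuildA, pvRebuild, hi]

-- the combined loop invariant: equal dp/split tables, and B's carried minimum is pvBest
lemma pv_main_invariant (p : List Int) (dp0 : List (Option Int)) (sp0 : List Int)
    (hdp0 : dp0.length = p.length) (hsp0 : sp0.length = p.length)
    (h0 : ∀ t, 2 ≤ t → dp0.getD t none = none) :
    ∀ m, m ≤ p.length - 2 → 2 ≤ p.length →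
    ((List.range' 2 m).foldl (pvOuterA p) (dp0, sp0)).1 =
      ((List.range' 2 m).foldl (pvOuterB p) (dp0, sp0, none)).1 ∧
    ((List.range' 2 m).foldl (pvOuterA p) (dp0, sp0)).2 =
      ((List.range' 2 m).foldl (pvOuterB p) (dp0, sp0, none)).2.1 ∧
    ((List.range' 2 m).foldl (pvOuterB p) (dp0, sp0, none)).2.2 =
      pvBest p ((List.range' 2 m).foldl (pvOuterA p) (dp0, sp0)).1 m ∧
    ((List.range' 2 m).foldl (pvOuterA p) (dp0, sp0)).1.length = p.length ∧
    ((List.range' 2 m).foldl (pvOuterA p) (dp0, sp0)).2.length = p.length ∧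
    (∀ t, 2 + m ≤ t → ((List.range' 2 m).foldl (pvOuterA p) (dp0, sp0)).1.getD t none = none) := by
  intro m
  induction m with
  | zero =>
    intro _ _
    refine ⟨rfl, rfl, rfl, hdp0, hsp0, ?_⟩
    intro t ht; exact h0 t (by omega)
  | succ m ih =>
    intro hm hn
    obtain ⟨hdp, hsp, hbest, hldp, hlsp, hnone⟩ := ih (by omega) hn
    rw [List.range'_1_concat, List.foldl_append, List.foldl_append]
    set A := (List.range' 2 m).foldl (pvOuterA p) (dp0, sp0) with hA
    set B := (List.range' 2 m).foldl (pvOuterB p) (dp0, sp0, none) with hB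
    simp only [List.foldl_cons, List.foldl_nil]
    have hilt : 2 + m < p.length := by omega
    -- A's step
    have hstepA : pvOuterA p A (2+m) =
        (A.1.set (2+m) ((pvBest p A.1 (m+1)).map (fun b => b.1 + p.getD (2+m) 0)),
         A.2.set (2+m) ((pvBest p A.1 (m+1)).elim (A.2.getD (2+m) (-1)) (fun b => b.2))) := by
      unfold pvOuterA
      rw [pvInner_eq_thread p (2+m) (List.range (2+m-1)) A.1 A.2
        (fun j hj => by simp at hj; omega) (by omega) (by omega)]
      rw [hnone (2+m) (by omega)]
      rw [show (2+m-1) = m+1 by omega]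
      rw [pvThread_eq_best]
    -- B's step
    have hbset : pvBestStep p B.1 B.2.2 (2+m-2) = pvBest p A.1 (m+1) := by
      rw [show (2+m-2) = m by omega, ← hdp, hbest, ← pvBest_succ, hdp]
    cases hbm : pvBest p A.1 (m+1) with
    | none =>
      have hAstep : pvOuterA p A (2+m) = A := by
        rw [hstepA, hbm]
        simp only [Option.map_none, Option.elim_none]
        rw [show (none : Option Int) = A.1.getD (2+m) none from (hnone (2+m) (by omega)).symm]
        rw [pv_set_getD_self _ _ _ (by omega), pv_set_getD_self _ _ _ (by omega)]
      have hBstep : pvOuterB p B (2+m) = (B.1, B.2.1, none) := by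
        unfold pvOuterB
        rw [hbset, hbm]
      rw [hAstep, hBstep]
      refine ⟨hdp, hsp, by simp [hbm], hldp, hlsp, ?_⟩
      intro t ht; exact hnone t (by omega)
    | some bb =>
      have hAstep : pvOuterA p A (2+m) =
          (A.1.set (2+m) (some (bb.1 + p.getD (2+m) 0)), A.2.set (2+m) bb.2) := by
        rw [hstepA, hbm]; rfl
      have hBstep : pvOuterB p B (2+m) =
          (B.1.set (2+m) (some (bb.1 + p.getD (2+m) 0)), B.2.1.set (2+m) bb.2, some bb) := by
        unfold pvOuterB
        rw [hbset, hbm]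
      rw [hAstep, hBstep, ← hdp, ← hsp]
      refine ⟨rfl, rfl, ?_, by simp [hldp], by simp [hlsp], ?_⟩
      · simp only
        rw [pvBest_set_high p A.1 (2+m) _ (m+1) (by omega), hbm]
      · intro t ht
        rw [pv_getD_set_ne _ _ _ _ _ (by omega)]
        exact hnone t (by omega)

-- ===== VERDICT (by name: the statement is the Claim_ definition above) =====
theorem dp_grouping_spec : Claim_equal_dp_grouping := by
  intro p _
  unfold Spec_dp_grouping dp_grouping dp_grouping_alt
  by_cases h2 : p.length < 2
  · simp [h2]
  · simp only [h2, if_false]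
    have hn : 2 ≤ p.length := by omega
    have hrep : ((List.replicate p.length (none : Option Int)).set 0 none) =
        List.replicate p.length (none : Option Int) := List.set_replicate_self
    rw [hrep]
    obtain ⟨hdp, hsp, -, -, -, -⟩ := pv_main_invariant p
      ((List.replicate p.length (none : Option Int)).set 1 (some (p.getD 1 0 - p.getD 0 0)))
      (List.replicate p.length (-1))
      (by simp) (by simp)
      (fun t ht => by
        rw [pv_getD_set_ne _ _ _ _ _ (by omega)]
        simp only [List.getD_eq_getElem?_getD, List.getElem?_replicate]
        split <;> rfl)
      (p.length - 2) (le_refl _) hn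
    rw [hsp, pvBuildA_eq_rebuild]
    simp
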